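-- pv_equiv track=rewrite | github.com/pypi-data/pypi-mirror-392 | packages/ssh-zone-handler/ssh_zone_handler-0.4.0-py3-none-any.whl/ssh_zone_handler/knot.py | __filter_dump
-- ===== SOURCE A (Python) =====
-- def __filter_dump(content: str, zone: str) -> str:
--     prefix = f"[{zone}.] "
--     offset = len(prefix)
--     lines = content.split("\n")
--     filtered: list[str] = []
--
--     for line in lines:
--         no_prefix = line
--         if line.startswith(prefix):
--             no_prefix = line[offset:]
--         filtered.append(no_prefix)
--
--     return "\n".join(filtered)
-- ===== SOURCE B (Python) =====
-- def __filter_dump(content: str, zone: str) -> str: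
--     prefix = f"[{zone}.] "
--     if content.startswith(prefix):
--         content = content[len(prefix):]
--     return content.replace("\n" + prefix, "\n")
-- ===== Notes on version B (the rewrite author's own statement) =====
-- stated objective: simpler
-- what changed: Replaces the split-into-lines / per-line loop / join pipeline with one whole-string replace of '\n'+prefix by '\n' (plus a single startswith check for the first line), so no list of lines is ever built or iterated.
-- outside the precondition, e.g. on __filter_dump('[a\nb.] x', 'a\nb'): A returns '[a\nb.] x', B returns 'x'
import Mathlib
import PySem

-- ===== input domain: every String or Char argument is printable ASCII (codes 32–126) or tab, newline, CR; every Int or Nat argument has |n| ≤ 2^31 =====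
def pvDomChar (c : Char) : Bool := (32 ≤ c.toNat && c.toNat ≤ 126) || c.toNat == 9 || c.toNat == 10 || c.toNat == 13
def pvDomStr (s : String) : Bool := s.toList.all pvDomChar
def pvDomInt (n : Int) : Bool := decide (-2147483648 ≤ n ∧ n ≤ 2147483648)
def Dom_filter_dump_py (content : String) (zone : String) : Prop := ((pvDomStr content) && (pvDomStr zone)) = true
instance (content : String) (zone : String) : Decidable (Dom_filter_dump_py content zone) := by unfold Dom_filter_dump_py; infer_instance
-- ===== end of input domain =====

-- B strips the per-line zone prefix with one whole-string replace of "\n"+prefix (plus a startswith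
-- check for the first line) instead of A's split / per-line loop / join; same cost, shorter code.

-- ===== PORT A =====
def filter_dump_py (content : String) (zone : String) : String :=
  let pfx : List Char := '[' :: zone.toList ++ ['.', ']', ' ']      -- prefix = f"[{zone}.] "
  let offset : Int := (pfx.length : Int)                            -- offset = len(prefix)
  let lines := PySem.Chars.splitOn content.toList ['\n']            -- content.split("\n")
  let filtered : List (List Char) := lines.foldl (fun acc line =>
    acc ++ [if PySem.Chars.startswith line pfx
            then PySem.Chars.slice line (some offset) none          -- line[offset:]
            else line]) []
  String.ofList (PySem.Chars.join ['\n'] filtered)                      -- "\n".join(filtered)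

-- ===== PORT B =====
def filter_dump_py_alt (content : String) (zone : String) : String :=
  let pfx : List Char := '[' :: zone.toList ++ ['.', ']', ' ']      -- prefix = f"[{zone}.] "
  let c0 := content.toList
  let c1 := if PySem.Chars.startswith c0 pfx
            then PySem.Chars.slice c0 (some (pfx.length : Int)) none  -- content[len(prefix):]
            else c0
  String.ofList (PySem.Chars.replace c1 ('\n' :: pfx) ['\n'])           -- .replace("\n"+prefix, "\n")

-- ===== PRECONDITION & SPEC =====
-- Pre_ excludes zones containing a newline (outside the natural domain of DNS zone names) when the
-- resulting multi-line prefix actually occurs at a line start of content: there A's per-line prefix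
-- test can never match while B's whole-string replace strips it.
def Pre_filter_dump_py (content : String) (zone : String) : Prop :=
  '\n' ∉ zone.toList ∨
    (¬ PySem.Chars.startswith content.toList ('[' :: zone.toList ++ ['.', ']', ' ']) = true ∧
     ¬ PySem.Chars.isIn ('\n' :: '[' :: zone.toList ++ ['.', ']', ' ']) content.toList = true)
instance (content : String) (zone : String) : Decidable (Pre_filter_dump_py content zone) := by
  unfold Pre_filter_dump_py; infer_instance

def pvWitness_filter_dump_py : String × String := ("[ex.] line1\nline2\n[ex.] line3", "ex")

def Spec_filter_dump_py (content : String) (zone : String) (out : String) : Prop :=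
  out = filter_dump_py_alt content zone
instance (content : String) (zone : String) (out : String) : Decidable (Spec_filter_dump_py content zone out) := by
  unfold Spec_filter_dump_py; infer_instance

-- ===== CLAIM (what is proved, stated in full; the proofs are below) =====
def Claim_equal_filter_dump_py : Prop := ∀ (content : String) (zone : String), Dom_filter_dump_py content zone → Pre_filter_dump_py content zone → Spec_filter_dump_py content zone (filter_dump_py content zone)

-- ===== LEMMAS AND PROOFS =====

-- clean recursion for content.split("\n")
def splitNl : List Char → List (List Char)
  | [] => [[]]
  | c :: t => if c = '\n' then [] :: splitNl t else (splitNl t).modifyHead (c :: ·)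

-- clean recursion for s.replace("\n" ++ pfx, "\n")
def replAux (pfx : List Char) : List Char → List Char
  | [] => []
  | c :: t =>
    if ('\n' :: pfx).isPrefixOf (c :: t)
    then '\n' :: replAux pfx (t.drop pfx.length)
    else c :: replAux pfx t
termination_by l => l.length
decreasing_by all_goals simp

-- "no_prefix = line; if startswith: no_prefix = line[offset:]"
def stripPfx (pfx : List Char) (l : List Char) : List Char :=
  if pfx.isPrefixOf l then l.drop pfx.length else l

theorem splitNl_ne_nil (c : List Char) : splitNl c ≠ [] := by
  cases c with
  | nil => simp [splitNl]
  | cons a t => unfold splitNl; split <;> simp [List.modifyHead_eq_nil_iff, splitNl_ne_nil t]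

theorem splitOn_go_eq (fuel : Nat) (l cur : List Char) (acc : List (List Char)) (hf : l.length + 1 ≤ fuel) :
    PySem.Chars.splitOn.go ['\n'] fuel l cur acc
      = acc.reverse ++ (splitNl l).modifyHead (cur.reverse ++ ·) := by
  induction fuel generalizing l cur acc with
  | zero => omega
  | succ f ih =>
    cases l with
    | nil => simp [PySem.Chars.splitOn.go, splitNl]
    | cons c rest =>
      rw [PySem.Chars.splitOn.go]
      by_cases hc : c = '\n'
      · subst hc
        simp only [List.isPrefixOf, beq_self_eq_true, Bool.and_eq_true, true_and, if_pos]
        have hdrop : List.drop (['\n'].length) ('\n' :: rest) = rest := rfl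
        rw [hdrop, ih _ _ _ (by simp at hf; omega)]
        simp only [splitNl, List.reverse_cons, List.append_assoc, List.cons_append,
          List.nil_append]
        cases hsp : splitNl rest with
        | nil => exact absurd hsp (splitNl_ne_nil rest)
        | cons h t => simp
      · have hp : (['\n'].isPrefixOf (c :: rest)) = false := by
          simp [List.isPrefixOf]; exact fun h => absurd h.symm hc
        rw [if_neg (by simp [hp])]
        rw [ih _ _ _ (by simp at hf ⊢; omega)]
        simp only [splitNl, if_neg hc]
        cases hsp : splitNl rest with
        | nil => exact absurd hsp (splitNl_ne_nil rest)
        | cons h t => simp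

theorem splitOn_nl (c : List Char) : PySem.Chars.splitOn c ['\n'] = splitNl c := by
  rw [PySem.Chars.splitOn, splitOn_go_eq c.length.succ c [] [] (by omega)]
  cases hsp : splitNl c with
  | nil => exact absurd hsp (splitNl_ne_nil c)
  | cons h t => simp

theorem replace_go_eq (pfx : List Char) (fuel : Nat) (l acc : List Char) (hf : l.length ≤ fuel) :
    PySem.Chars.replace.go ('\n' :: pfx) ['\n'] fuel l acc = acc.reverse ++ replAux pfx l := by
  induction fuel generalizing l acc with
  | zero =>
    have : l = [] := by cases l with | nil => rfl | cons a t => simp at hf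
    subst this
    simp [PySem.Chars.replace.go, replAux]
  | succ f ih =>
    cases l with
    | nil => simp [PySem.Chars.replace.go, replAux]
    | cons c t =>
      rw [PySem.Chars.replace.go, replAux]
      by_cases hp : ('\n' :: pfx).isPrefixOf (c :: t) = true
      · rw [if_pos hp, if_pos hp]
        have hdrop : List.drop (('\n' :: pfx).length) (c :: t) = t.drop pfx.length := by simp
        rw [hdrop, ih _ _ (by simp at hf ⊢; omega)]
        simp
      · rw [if_neg hp, if_neg hp, ih _ _ (by simp at hf ⊢; omega)]
        simp

theorem replace_eq (pfx c : List Char) :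
    PySem.Chars.replace c ('\n' :: pfx) ['\n'] = replAux pfx c := by
  rw [PySem.Chars.replace, if_neg (by simp), replace_go_eq pfx c.length c [] (by omega)]
  simp

theorem replAux_no_nl (pfx s : List Char) (hs : '\n' ∉ s) : replAux pfx s = s := by
  induction s with
  | nil => simp [replAux]
  | cons c t ih =>
    rw [replAux, if_neg (by simp; intro h; exact absurd (h ▸ List.mem_cons_self) hs)]
    rw [ih (fun h => hs (List.mem_cons_of_mem c h))]

theorem replAux_step (pfx s c' : List Char) (hs : '\n' ∉ s) :
    replAux pfx (s ++ '\n' :: c') = s ++ '\n' :: replAux pfx (stripPfx pfx c') := by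
  induction s with
  | nil =>
    rw [List.nil_append, replAux, stripPfx]
    have hcond : (('\n' :: pfx).isPrefixOf ('\n' :: c')) = pfx.isPrefixOf c' := by
      simp [List.isPrefixOf]
    by_cases hp : pfx.isPrefixOf c' = true
    · rw [if_pos (by rw [hcond]; exact hp), if_pos hp]
      simp
    · rw [if_neg (by rw [hcond]; exact hp), if_neg hp]
      simp
  | cons a t ih =>
    rw [List.cons_append, replAux,
        if_neg (by simp; intro h; exact absurd (h ▸ List.mem_cons_self) hs)]
    rw [ih (fun h => hs (List.mem_cons_of_mem a h))]
    rfl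

theorem splitNl_no_nl (a : List Char) (h : '\n' ∉ a) : splitNl a = [a] := by
  induction a with
  | nil => rfl
  | cons c t ih =>
    rw [splitNl, if_neg (by intro hc; subst hc; exact h List.mem_cons_self),
        ih (fun hm => h (List.mem_cons_of_mem c hm))]
    rfl

theorem splitNl_append (a c' : List Char) (h : '\n' ∉ a) :
    splitNl (a ++ '\n' :: c') = a :: splitNl c' := by
  induction a with
  | nil => simp [splitNl]
  | cons x t ih =>
    rw [List.cons_append, splitNl, if_neg (by intro hc; subst hc; exact h List.mem_cons_self),
        ih (fun hm => h (List.mem_cons_of_mem x hm))]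
    rfl

theorem prefix_split {p a t : List Char} {b : Char} (h : p <+: a ++ b :: t) :
    p <+: a ∨ b ∈ p := by
  induction a generalizing p with
  | nil =>
    cases p with
    | nil => exact Or.inl List.nil_prefix
    | cons q p' =>
      rw [List.nil_append, List.cons_prefix_cons] at h
      exact Or.inr (h.1 ▸ List.mem_cons_self)
  | cons x a' ih =>
    cases p with
    | nil => exact Or.inl List.nil_prefix
    | cons q p' =>
      rw [List.cons_append, List.cons_prefix_cons] at h
      obtain ⟨rfl, h2⟩ := h
      rcases ih h2 with h3 | h3
      · exact Or.inl (List.cons_prefix_cons.mpr ⟨rfl, h3⟩)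
      · exact Or.inr (List.mem_cons_of_mem _ h3)

theorem stripPfx_no_nl (pfx c : List Char) (h : '\n' ∉ c) : '\n' ∉ stripPfx pfx c := by
  unfold stripPfx
  split
  · exact fun hm => h (List.mem_of_mem_drop hm)
  · exact h

theorem stripPfx_append (pfx a c' : List Char) (hn : '\n' ∉ pfx) :
    stripPfx pfx (a ++ '\n' :: c') = stripPfx pfx a ++ '\n' :: c' := by
  unfold stripPfx
  by_cases hp : pfx.isPrefixOf a = true
  · have hpp : pfx <+: a := List.isPrefixOf_iff_prefix.mp hp
    rw [if_pos hp,
        if_pos (List.isPrefixOf_iff_prefix.mpr (hpp.trans (List.prefix_append a _))),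
        List.drop_append_of_le_length hpp.length_le]
  · rw [if_neg hp, if_neg ?hcond]
    case hcond =>
      intro hP
      rcases prefix_split (List.isPrefixOf_iff_prefix.mp hP) with h | h
      · exact hp (List.isPrefixOf_iff_prefix.mpr h)
      · exact hn h

theorem nl_decomp (c : List Char) (h : '\n' ∈ c) :
    ∃ a c', c = a ++ '\n' :: c' ∧ '\n' ∉ a := by
  induction c with
  | nil => simp at h
  | cons x t ih =>
    by_cases hx : x = '\n'
    · exact ⟨[], t, by rw [hx]; rfl, by simp⟩
    · have ht : '\n' ∈ t := by
        rcases List.mem_cons.mp h with h1 | h1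
        · exact absurd h1.symm hx
        · exact h1
      obtain ⟨a, c', rfl, ha⟩ := ih ht
      refine ⟨x :: a, c', rfl, fun hm => ?_⟩
      rcases List.mem_cons.mp hm with h1 | h1
      · exact hx h1.symm
      · exact ha h1

theorem main_aux (pfx : List Char) (hn : '\n' ∉ pfx) :
    ∀ (n : Nat) (c : List Char), c.length ≤ n →
      PySem.Chars.join ['\n'] ((splitNl c).map (stripPfx pfx)) = replAux pfx (stripPfx pfx c) := by
  intro n
  induction n with
  | zero =>
    intro c hc
    have hcnil : c = [] := List.eq_nil_of_length_eq_zero (by omega)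
    subst hcnil
    rw [splitNl_no_nl [] (by simp), List.map_singleton, PySem.Chars.join_singleton,
        replAux_no_nl pfx _ (stripPfx_no_nl pfx [] (by simp))]
  | succ m ih =>
    intro c hc
    by_cases hm : '\n' ∈ c
    · obtain ⟨a, c', rfl, ha⟩ := nl_decomp c hm
      rw [splitNl_append a c' ha, stripPfx_append pfx a c' hn,
          replAux_step pfx _ c' (stripPfx_no_nl pfx a ha), List.map_cons]
      cases hmap : (splitNl c').map (stripPfx pfx) with
      | nil => exact absurd (List.map_eq_nil_iff.mp hmap) (splitNl_ne_nil c')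
      | cons h t =>
        rw [PySem.Chars.join_cons_cons, ← hmap, ih c' (by simp at hc; omega)]
        simp
    · rw [splitNl_no_nl c hm, List.map_singleton, PySem.Chars.join_singleton,
          replAux_no_nl pfx _ (stripPfx_no_nl pfx c hm)]

theorem join_splitNl (c : List Char) : PySem.Chars.join ['\n'] (splitNl c) = c := by
  induction c with
  | nil => rw [splitNl, PySem.Chars.join_singleton]
  | cons x t ih =>
    rw [splitNl]
    cases hsp : splitNl t with
    | nil => exact absurd hsp (splitNl_ne_nil t)
    | cons h t' =>
      rw [hsp] at ih
      by_cases hx : x = '\n'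
      · rw [if_pos hx, PySem.Chars.join_cons_cons, ih, hx]
        rfl
      · rw [if_neg hx, List.modifyHead_cons]
        cases t' with
        | nil =>
          rw [PySem.Chars.join_singleton]
          rw [PySem.Chars.join_singleton] at ih
          rw [ih]
        | cons h2 t2 =>
          rw [PySem.Chars.join_cons_cons]
          rw [PySem.Chars.join_cons_cons] at ih
          rw [List.cons_append, List.cons_append, ih]

theorem replAux_not_infix (pfx c : List Char) (h : ¬ ('\n' :: pfx) <:+: c) :
    replAux pfx c = c := by
  induction c with
  | nil => simp [replAux]
  | cons x t ih =>
    rw [replAux,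
        if_neg (fun hp => h (List.IsPrefix.isInfix (List.isPrefixOf_iff_prefix.mp hp)))]
    rw [ih (fun hi => h (hi.trans (List.suffix_cons x t).isInfix))]

theorem splitNl_lines (c : List Char) :
    ∀ {h t}, splitNl c = h :: t → h <+: c ∧ ∀ l ∈ t, ('\n' :: l) <:+: c := by
  induction c with
  | nil =>
    intro h t he
    rw [splitNl] at he
    injection he with h1 h2
    subst h1; subst h2
    exact ⟨List.nil_prefix, by simp⟩
  | cons x c' ih =>
    intro h t he
    rw [splitNl] at he
    cases hsp : splitNl c' with
    | nil => exact absurd hsp (splitNl_ne_nil c')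
    | cons h' t' =>
      obtain ⟨hp', ht'⟩ := ih hsp
      by_cases hx : x = '\n'
      · rw [if_pos hx, hsp] at he
        injection he with h1 h2
        subst h1; subst h2; subst hx
        refine ⟨List.nil_prefix, fun l hl => ?_⟩
        rcases List.mem_cons.mp hl with h1 | h1
        · subst h1
          exact (List.cons_prefix_cons.mpr ⟨rfl, hp'⟩).isInfix
        · exact (ht' l h1).trans (List.suffix_cons '\n' c').isInfix
      · rw [if_neg hx, hsp, List.modifyHead_cons] at he
        injection he with h1 h2
        subst h1; subst h2
        refine ⟨List.cons_prefix_cons.mpr ⟨rfl, hp'⟩, fun l hl => ?_⟩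
        exact (ht' l hl).trans (List.suffix_cons x c').isInfix

-- ===== VERDICT (by name: the statement is the Claim_ definition above) =====
theorem filter_dump_py_spec : Claim_equal_filter_dump_py := by
  intro content zone hDom hPre
  unfold Spec_filter_dump_py filter_dump_py filter_dump_py_alt
  show String.ofList _ = String.ofList _
  apply congrArg
  rw [PySem.List.foldl_append_singleton_eq_map, List.nil_append, splitOn_nl, replace_eq]
  have hfun : ∀ l : List Char,
      (if PySem.Chars.startswith l ('[' :: zone.toList ++ ['.', ']', ' '])
       then PySem.Chars.slice l (some ((('[' :: zone.toList ++ ['.', ']', ' ']).length : Nat) : Int)) none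
       else l) = stripPfx ('[' :: zone.toList ++ ['.', ']', ' ']) l := by
    intro l
    unfold stripPfx
    simp only [PySem.Chars.startswith, PySem.Chars.slice_eq_listSlice,
      List.isPrefixOf_iff_prefix]
    split
    · rw [PySem.List.slice_from_natCast]
    · rfl
  rw [List.map_congr_left (fun l _ => hfun l), hfun content.toList]
  rcases hPre with hPre | ⟨hsw, hin⟩
  · -- zone has no newline: the two traversals compute the same stripped text
    have hpfx : '\n' ∉ ('[' :: zone.toList ++ ['.', ']', ' ']) := by
      intro h
      rcases List.mem_cons.mp h with h1 | h1
      · exact absurd h1 (by decide)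
      · rcases List.mem_append.mp h1 with h2 | h2
        · exact hPre h2
        · exact absurd h2 (by decide)
    exact main_aux _ hpfx content.toList.length content.toList le_rfl
  · -- the prefix occurs at no line start of content: both sides leave content unchanged
    rw [PySem.Chars.isIn_iff_infix] at hin
    rw [PySem.Chars.startswith, List.isPrefixOf_iff_prefix] at hsw
    have hid : ∀ l ∈ splitNl content.toList,
        stripPfx ('[' :: zone.toList ++ ['.', ']', ' ']) l = l := by
      intro l hl
      unfold stripPfx
      rw [if_neg]
      intro hp
      rw [List.isPrefixOf_iff_prefix] at hp
      cases hsp : splitNl content.toList with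
      | nil => exact absurd hsp (splitNl_ne_nil content.toList)
      | cons h t =>
        obtain ⟨hh, ht⟩ := splitNl_lines content.toList hsp
        rw [hsp] at hl
        rcases List.mem_cons.mp hl with h1 | h1
        · exact hsw (hp.trans (h1 ▸ hh))
        · exact hin ((List.cons_prefix_cons.mpr ⟨rfl, hp⟩).isInfix.trans (ht l h1))
    rw [List.map_congr_left hid, List.map_id']
    have hsw' : stripPfx ('[' :: zone.toList ++ ['.', ']', ' ']) content.toList
        = content.toList := by
      unfold stripPfx
      rw [if_neg (fun hp => hsw (List.isPrefixOf_iff_prefix.mp hp))]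
    rw [hsw', replAux_not_infix ('[' :: zone.toList ++ ['.', ']', ' ']) content.toList hin, join_splitNl]
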